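-- pv_equiv track=rewrite | github.com/savarin/advent-of-code | 2023/src/day_11.py | scan_galaxies
-- ===== SOURCE A (Python) =====
-- from typing import Dict, List, Tuple
--
-- def scan_galaxies(
--     lines: List[str],
-- ) -> Tuple[Dict[int, Tuple[int, int]], List[bool], List[bool]]:
--     """
--     Scans the input data to identify galaxy locations and non-empty rows and
--     columns.
--
--     Args:
--         lines (List[str]): A list of strings representing the universe, where
--         '.' is empty space and '#' is a galaxy.
--
--     Returns:
--         Tuple[Dict[int, Tuple[int, int]], List[bool], List[bool]]: A tuple
--         containing a dictionary of galaxy locations indexed by galaxy number,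
--         and two lists indicating non-empty rows and columns.
--     """
--     # Initialize lists to track non-empty rows and columns.
--     non_empty_rows = [False for _ in range(len(lines))]
--     non_empty_columns = [False for _ in range(len(lines[0]))]
--
--     galaxies = {}
--     galaxy_count = 0
--
--     # Scan each character in the input data.
--     for i, line in enumerate(lines):
--         for j, char in enumerate(line):
--             if char == "#":
--                 # Mark the location of the galaxy and update the non-empty row
--                 # and column.
--                 galaxies[galaxy_count] = (i, j)
--                 galaxy_count += 1
--
--                 non_empty_rows[i] = True
--                 non_empty_columns[j] = True
--
--     return galaxies, non_empty_rows, non_empty_columns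
-- ===== SOURCE B (Python) =====
-- from typing import Dict, List, Tuple
--
--
-- def galaxy_columns(line: str, base: int = 0) -> List[int]:
--     """Positions of '#' in line, found by repeated substring search."""
--     k = line.find("#")
--     if k == -1:
--         return []
--     return [base + k] + galaxy_columns(line[k + 1:], base + k + 1)
--
--
-- def scan_galaxies(
--     lines: List[str],
-- ) -> Tuple[Dict[int, Tuple[int, int]], List[bool], List[bool]]:
--     # Galaxies: per-row substring search instead of a character-by-character scan.
--     galaxies: Dict[int, Tuple[int, int]] = {}
--     for i, line in enumerate(lines):
--         for j in galaxy_columns(line):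
--             galaxies[len(galaxies)] = (i, j)
--
--     # Rows/columns computed directly from the grid, not from galaxy bookkeeping:
--     # a row is non-empty iff it contains '#'; a column iff some line has '#' there.
--     non_empty_rows = ["#" in line for line in lines]
--     width = len(lines[0])
--     non_empty_columns = [any(line[j:j + 1] == "#" for line in lines) for j in range(width)]
--
--     return galaxies, non_empty_rows, non_empty_columns
-- ===== Notes on version B (the rewrite author's own statement) =====
-- stated objective: alternative
-- what changed: A does one interleaved character scan mutating boolean arrays and a counter; B finds galaxy positions per row by repeated str.find substring search, computes non-empty rows as ['#' in line] membership tests and non-empty columns column-major with any() over the grid, with no mutable flag arrays.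
import Mathlib
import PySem

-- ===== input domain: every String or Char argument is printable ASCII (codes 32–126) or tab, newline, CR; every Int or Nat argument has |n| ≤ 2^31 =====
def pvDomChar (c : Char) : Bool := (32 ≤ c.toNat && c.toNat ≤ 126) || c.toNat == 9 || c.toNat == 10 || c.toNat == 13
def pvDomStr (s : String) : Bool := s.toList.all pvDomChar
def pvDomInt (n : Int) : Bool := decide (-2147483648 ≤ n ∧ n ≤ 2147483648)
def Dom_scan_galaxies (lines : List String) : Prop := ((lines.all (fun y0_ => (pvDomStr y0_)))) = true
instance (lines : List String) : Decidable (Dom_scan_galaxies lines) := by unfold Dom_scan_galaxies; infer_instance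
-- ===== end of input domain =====

-- B replaces A's single interleaved character scan (mutating flag arrays and a counter) by:
-- per-row repeated substring search (str.find) for galaxy positions, '#'-membership tests for
-- rows, and a column-major any() over the grid for columns; same cost, no speed claim.


-- ===== PORT A =====
-- Transliteration of A. The dict 'galaxies' is kept as its items list: the keys
-- galaxy_count are fresh and strictly increasing, so each dict insertion is exactly an
-- append. 'lines[0]' (IndexError on []) is lines.headD ""; Pre_ excludes lines = [].
-- List assignments rows[i]=True / cols[j]=True are PySem.List.pySetD (exact in range;
-- Pre_ excludes the out-of-range IndexError case for columns; rows are always in range).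
def scan_galaxies (lines : List String) : (List (Int × Int × Int)) × List Bool × List Bool :=
  let non_empty_rows := List.replicate lines.length false
  let non_empty_columns := List.replicate (lines.headD "").toList.length false
  let st :=
    (PySem.List.enumerate lines).foldl
      (fun (st : List (Int × Int × Int) × Int × List Bool × List Bool) p =>
        (PySem.List.enumerate p.2.toList).foldl
          (fun st q =>
            if q.2 = '#' then
              (st.1 ++ [(st.2.1, p.1, q.1)], st.2.1 + 1,
               PySem.List.pySetD st.2.2.1 p.1 true,
               PySem.List.pySetD st.2.2.2 q.1 true)
            else st)
          st)
      (([] : List (Int × Int × Int)), (0 : Int), non_empty_rows, non_empty_columns)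
  (st.1, st.2.2.1, st.2.2.2)

-- ===== PORT B =====
-- Transliteration of Source B. galaxy_columns(line, base): line.find("#") is PySem.Chars.find,
-- line[k+1:] is PySem.List.slice; the recursion consumes a strict suffix each step, so it is
-- run on a structural fuel ≥ length+1, a totality guard only (never reached; see pvColsF_eq).
def pvGalaxyColsF : Nat → List Char → Int → List Int
  | 0, _, _ => []
  | fuel + 1, cs, base =>
    let k := PySem.Chars.find cs ['#']
    if k = -1 then []
    else (base + k) :: pvGalaxyColsF fuel (PySem.List.slice cs (some (k + 1)) none) (base + k + 1)

def galaxy_columns (line : List Char) (base : Int) : List Int :=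
  pvGalaxyColsF (line.length + 1) line base

def scan_galaxies_alt (lines : List String) : (List (Int × Int × Int)) × List Bool × List Bool :=
  let galaxies :=
    (PySem.List.enumerate lines).foldl
      (fun (g : List (Int × Int × Int)) p =>
        (galaxy_columns p.2.toList 0).foldl
          (fun g j => g ++ [((g.length : Int), p.1, j)]) g)
      []
  let non_empty_rows := lines.map (fun line => PySem.Str.isIn "#" line)
  let width := ((lines.headD "").toList.length : Int)
  let non_empty_columns :=
    (PySem.List.pyRange 0 width 1).map
      (fun j => lines.any (fun line => PySem.Str.slice line (some j) (some (j + 1)) == "#"))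
  (galaxies, non_empty_rows, non_empty_columns)

-- ===== PRECONDITION & SPEC =====
-- Pre_ excludes exactly the inputs where A raises IndexError: empty 'lines' (lines[0]),
-- and a '#' at a column ≥ len(lines[0]) in a ragged line (non_empty_columns[j]).
def Pre_scan_galaxies (lines : List String) : Prop :=
  lines ≠ [] ∧
    (lines.all (fun l =>
      (l.toList.drop (lines.headD "").toList.length).all (fun c => !(c == '#')))) = true
instance (lines : List String) : Decidable (Pre_scan_galaxies lines) := by
  unfold Pre_scan_galaxies; infer_instance
def pvWitness_scan_galaxies : List String := ["..#", ".#.", "#.."]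
def Spec_scan_galaxies (lines : List String) (out : (List (Int × Int × Int)) × List Bool × List Bool) : Prop := out = scan_galaxies_alt lines
instance (lines : List String) (out : (List (Int × Int × Int)) × List Bool × List Bool) : Decidable (Spec_scan_galaxies lines out) := by unfold Spec_scan_galaxies; infer_instance

-- ===== CLAIM (what is proved, stated in full; the proofs are below) =====
def Claim_equal_scan_galaxies : Prop := ∀ (lines : List String), Dom_scan_galaxies lines → Pre_scan_galaxies lines → Spec_scan_galaxies lines (scan_galaxies lines)

-- ===== LEMMAS AND PROOFS =====

-- galaxies collected from one enumerated line i
def pvLine (i : Int) (cs : List (Int × Char)) : List (Int × Int) :=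
  cs.filterMap (fun q => if q.2 = '#' then some (i, q.1) else none)

-- all '#' coordinates, row-major
def pvCoords (lines : List String) : List (Int × Int) :=
  (PySem.List.enumerate lines).flatMap (fun p => pvLine p.1 (PySem.List.enumerate p.2.toList))

-- the marking loop of A
def pvMark (ps : List (Int × Int)) (sel : Int × Int → Int) (l : List Bool) : List Bool :=
  ps.foldl (fun l p => PySem.List.pySetD l (sel p) true) l

lemma pvMark_append (ps qs : List (Int × Int)) (sel : Int × Int → Int) (l : List Bool) :
    pvMark (ps ++ qs) sel l = pvMark qs sel (pvMark ps sel l) := by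
  simp [pvMark, List.foldl_append]

-- A's inner loop over one enumerated line, characterised by pvLine
lemma pvInner (i : Int) (cs : List (Int × Char)) (g : List (Int × Int × Int)) (c : Int)
    (r co : List Bool) :
    cs.foldl
      (fun (st : List (Int × Int × Int) × Int × List Bool × List Bool) q =>
        if q.2 = '#' then
          (st.1 ++ [(st.2.1, i, q.1)], st.2.1 + 1,
           PySem.List.pySetD st.2.2.1 i true,
           PySem.List.pySetD st.2.2.2 q.1 true)
        else st)
      (g, c, r, co)
    = (g ++ PySem.List.enumerate (pvLine i cs) c, c + (pvLine i cs).length,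
       pvMark (pvLine i cs) (·.1) r, pvMark (pvLine i cs) (·.2) co) := by
  induction cs generalizing g c r co with
  | nil => simp [pvLine, pvMark]
  | cons q cs ih =>
    by_cases h : q.2 = '#'
    · simp [List.foldl_cons, h, ih, pvLine, PySem.List.enumerate_cons, pvMark]
      ring
    · simp only [List.foldl_cons, if_neg h, ih, pvLine, List.filterMap_cons]

-- A's outer loop
lemma pvOuter (L : List (Int × String)) (g : List (Int × Int × Int)) (c : Int)
    (r co : List Bool) :
    L.foldl
      (fun (st : List (Int × Int × Int) × Int × List Bool × List Bool) p =>
        (PySem.List.enumerate p.2.toList).foldl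
          (fun st q =>
            if q.2 = '#' then
              (st.1 ++ [(st.2.1, p.1, q.1)], st.2.1 + 1,
               PySem.List.pySetD st.2.2.1 p.1 true,
               PySem.List.pySetD st.2.2.2 q.1 true)
            else st)
          st)
      (g, c, r, co)
    = (g ++ PySem.List.enumerate (L.flatMap (fun p => pvLine p.1 (PySem.List.enumerate p.2.toList))) c,
       c + (L.flatMap (fun p => pvLine p.1 (PySem.List.enumerate p.2.toList))).length,
       pvMark (L.flatMap (fun p => pvLine p.1 (PySem.List.enumerate p.2.toList))) (·.1) r,
       pvMark (L.flatMap (fun p => pvLine p.1 (PySem.List.enumerate p.2.toList))) (·.2) co) := by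
  induction L generalizing g c r co with
  | nil => simp [pvMark]
  | cons p L ih =>
    simp [List.foldl_cons, pvInner, ih, List.flatMap_cons,
      PySem.List.enumerate_append, pvMark_append]
    ring

-- [a] is a prefix iff it is the head
lemma pvSingleton_prefix (a : Char) (l : List Char) : [a] <+: l ↔ l.head? = some a := by
  cases l with
  | nil => simp
  | cons x t => simp [List.cons_prefix_cons, eq_comm]

lemma pvHash_at (cs : List Char) (n : Nat) : ['#'] <+: cs.drop n ↔ cs[n]? = some '#' := by
  rw [pvSingleton_prefix, List.head?_drop]

-- facts about the first '#' found
lemma pvFindFacts (cs : List Char) (h : PySem.Chars.find cs ['#'] ≠ -1) :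
    0 ≤ PySem.Chars.find cs ['#'] ∧
    cs[(PySem.Chars.find cs ['#']).toNat]? = some '#' ∧
    ∀ i < (PySem.Chars.find cs ['#']).toNat, cs[i]? ≠ some '#' := by
  have h0 : 0 ≤ PySem.Chars.find cs ['#'] := by
    have := PySem.Chars.neg_one_le_find cs ['#']; omega
  have hs := PySem.Chars.find_spec h0
  refine ⟨h0, (pvHash_at _ _).1 hs.1, fun i hi hc => hs.2 i hi ((pvHash_at _ _).2 hc)⟩

-- a filterMap over an enumerated hash-free list is empty
lemma pvNoHash (cs : List Char) (b : Int) (h : '#' ∉ cs) :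
    (PySem.List.enumerate cs b).filterMap
      (fun q => if q.2 = '#' then some q.1 else none) = [] := by
  induction cs generalizing b with
  | nil => simp
  | cons c t ih =>
    simp only [List.mem_cons, not_or] at h
    simp [PySem.List.enumerate_cons, Ne.symm h.1, ih _ h.2]

-- splitting the enumerated filterMap at the first '#'
lemma pvSplit (n : Nat) (cs : List Char) (b : Int)
    (h1 : ∀ i < n, cs[i]? ≠ some '#') (h2 : cs[n]? = some '#') :
    (PySem.List.enumerate cs b).filterMap
      (fun q => if q.2 = '#' then some q.1 else none)
    = (b + n) :: (PySem.List.enumerate (cs.drop (n + 1)) (b + n + 1)).filterMap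
        (fun q => if q.2 = '#' then some q.1 else none) := by
  induction n generalizing cs b with
  | zero =>
    cases cs with
    | nil => simp at h2
    | cons c t =>
      simp only [List.getElem?_cons_zero, Option.some_inj] at h2
      simp [PySem.List.enumerate_cons, h2]
  | succ m ih =>
    cases cs with
    | nil => simp at h2
    | cons c t =>
      have hc : c ≠ '#' := by
        have := h1 0 (Nat.succ_pos m); simpa using this
      have := ih t (b + 1) (fun i hi => by
        have := h1 (i + 1) (by omega); simpa using this) (by simpa using h2)
      simp only [PySem.List.enumerate_cons, List.filterMap_cons, hc, if_false,
        List.drop_succ_cons]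
      rw [this]
      congr 1
      · push_cast; ring
      · congr 2
        push_cast; ring

-- the fuelled find-loop computes the enumerated filterMap
lemma pvColsF_eq (fuel : Nat) (cs : List Char) (b : Int) (hf : cs.length < fuel) :
    pvGalaxyColsF fuel cs b
    = (PySem.List.enumerate cs b).filterMap
        (fun q => if q.2 = '#' then some q.1 else none) := by
  induction fuel generalizing cs b with
  | zero => omega
  | succ fuel ih =>
    by_cases h : PySem.Chars.find cs ['#'] = -1
    · have hmem : '#' ∉ cs := by
        have := (PySem.Chars.find_eq_neg_one_iff cs ['#']).1 h
        intro hm; exact this ((List.singleton_infix_iff _ _).2 hm)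
      simp [pvGalaxyColsF, h, pvNoHash _ _ hmem]
    · obtain ⟨h0, hat, hmin⟩ := pvFindFacts cs h
      set k := PySem.Chars.find cs ['#'] with hk
      have hkn : k.toNat < cs.length := by
        obtain ⟨h1, -⟩ := List.getElem?_eq_some_iff.1 hat
        exact h1
      have hdrop : PySem.List.slice cs (some (k + 1)) none = cs.drop (k.toNat + 1) := by
        rw [PySem.List.slice_from _ (by omega)]
        congr 1; omega
      have hcast : ((k.toNat : Int)) = k := Int.toNat_of_nonneg h0
      rw [pvSplit k.toNat cs b hmin hat, hcast]
      simp only [pvGalaxyColsF, ← hk, if_neg h, hdrop]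
      have hrec : (cs.drop (k.toNat + 1)).length < fuel := by
        rw [List.length_drop]; omega
      rw [ih _ _ hrec]

-- pvLine is the column filterMap paired with the row
lemma pvLine_eq_map (i : Int) (xs : List (Int × Char)) :
    pvLine i xs
    = (xs.filterMap (fun q => if q.2 = '#' then some q.1 else none)).map (fun j => (i, j)) := by
  rw [List.map_filterMap]
  unfold pvLine
  apply List.filterMap_congr
  intro q _
  by_cases h : q.2 = '#' <;> simp [h]

-- B's inner galaxy loop: appending with key len(galaxies) is enumeration
lemma pvBInner (js : List Int) (i : Int) (g : List (Int × Int × Int)) :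
    js.foldl (fun g j => g ++ [((g.length : Int), i, j)]) g
    = g ++ PySem.List.enumerate (js.map (fun j => (i, j))) g.length := by
  induction js generalizing g with
  | nil => simp
  | cons j js ih =>
    simp only [List.foldl_cons, ih, List.map_cons, PySem.List.enumerate_cons]
    simp [List.append_assoc]

-- B's outer galaxy loop
lemma pvBOuter (L : List (Int × String)) (g : List (Int × Int × Int)) :
    L.foldl
      (fun (g : List (Int × Int × Int)) p =>
        (galaxy_columns p.2.toList 0).foldl
          (fun g j => g ++ [((g.length : Int), p.1, j)]) g) g
    = g ++ PySem.List.enumerate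
        (L.flatMap (fun p => pvLine p.1 (PySem.List.enumerate p.2.toList))) g.length := by
  induction L generalizing g with
  | nil => simp
  | cons p L ih =>
    have hcols : galaxy_columns p.2.toList 0
        = (PySem.List.enumerate p.2.toList).filterMap
            (fun q => if q.2 = '#' then some q.1 else none) := by
      unfold galaxy_columns
      exact pvColsF_eq _ _ _ (by simp)
    simp only [List.foldl_cons, hcols]
    rw [show ((PySem.List.enumerate p.2.toList).filterMap
          (fun q => if q.2 = '#' then some q.1 else none)).foldl
          (fun g j => g ++ [((g.length : Int), p.1, j)]) g
        = g ++ PySem.List.enumerate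
            (pvLine p.1 (PySem.List.enumerate p.2.toList)) g.length from by
      rw [pvBInner, ← pvLine_eq_map]]
    rw [ih, List.flatMap_cons, PySem.List.enumerate_append]
    simp [List.append_assoc]

-- the marking loop preserves length
lemma pvMark_length (ps : List (Int × Int)) (sel : Int × Int → Int) (l : List Bool) :
    (pvMark ps sel l).length = l.length := by
  induction ps generalizing l with
  | nil => rfl
  | cons p ps ih => simp [pvMark, List.foldl_cons] at ih ⊢; rw [ih, PySem.List.length_pySetD]

-- pointwise value of the marking loop (non-negative targets)
lemma pvMark_getElem? (ps : List (Int × Int)) (sel : Int × Int → Int) (l : List Bool)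
    (hnn : ∀ p ∈ ps, 0 ≤ sel p) (t : Nat) :
    (pvMark ps sel l)[t]?
    = (l[t]?).map (fun v => v || ps.any (fun p => decide (sel p = (t : Int)))) := by
  induction ps generalizing l with
  | nil => simp [pvMark]
  | cons p ps ih =>
    have h0 : 0 ≤ sel p := hnn p (List.mem_cons_self ..)
    have hstep : pvMark (p :: ps) sel l = pvMark ps sel (l.set (sel p).toNat true) := by
      simp [pvMark, List.foldl_cons, PySem.List.pySetD_of_nonneg l true h0]
    rw [hstep, ih _ (fun q hq => hnn q (List.mem_cons_of_mem _ hq))]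
    by_cases he : sel p = (t : Int)
    · have hn : (sel p).toNat = t := by omega
      by_cases hlt : t < l.length
      · simp [he, hlt]
      · have hnone : l[t]? = none := List.getElem?_eq_none (by omega)
        have hnone' : (l.set (sel p).toNat true)[t]? = none :=
          List.getElem?_eq_none (by simpa using (by omega : l.length ≤ t))
        simp [hnone, hnone']
    · have hn : (sel p).toNat ≠ t := by omega
      simp [List.getElem?_set, hn, he]


lemma pvMark_getElem (ps : List (Int × Int)) (sel : Int × Int → Int) (l : List Bool)
    (hnn : ∀ p ∈ ps, 0 ≤ sel p) (t : Nat) (ht : t < l.length)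
    (ht' : t < (pvMark ps sel l).length) :
    (pvMark ps sel l)[t]
    = (l[t] || ps.any (fun p => decide (sel p = (t : Int)))) := by
  have h := pvMark_getElem? ps sel l hnn t
  rw [List.getElem?_eq_getElem ht', List.getElem?_eq_getElem ht] at h
  simpa using h

-- membership in the coordinate list
lemma pvMem_coords (lines : List String) (q : Int × Int) :
    q ∈ pvCoords lines
    ↔ ∃ (k : Nat) (hk : k < lines.length) (m : Nat) (hm : m < (lines[k]).toList.length),
        (lines[k]).toList[m] = '#' ∧ q = ((k : Int), (m : Int)) := by
  unfold pvCoords pvLine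
  simp only [List.mem_flatMap, PySem.List.mem_enumerate_iff, List.mem_filterMap]
  constructor
  · rintro ⟨p, ⟨k, hk, rfl⟩, r, hr, hfr⟩
    obtain ⟨m, hm, rfl⟩ := hr
    simp only [zero_add] at hfr hm ⊢
    by_cases hc : (lines[k]).toList[m] = '#'
    · refine ⟨k, hk, m, hm, hc, ?_⟩
      simp only [hc, if_true] at hfr
      simp [← Option.some_inj.1 hfr]
    · simp [hc] at hfr
  · rintro ⟨k, hk, m, hm, hc, rfl⟩
    refine ⟨((k : Int), lines[k]), ⟨k, hk, by simp⟩,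
      ((m : Int), (lines[k]).toList[m]), ⟨m, hm, by simp⟩, by simp [hc]⟩

lemma pvCoords_nonneg_fst (lines : List String) :
    ∀ p ∈ pvCoords lines, 0 ≤ (fun (p : Int × Int) => p.1) p := by
  intro p hp
  obtain ⟨k, _, m, _, _, rfl⟩ := (pvMem_coords lines p).1 hp
  simp

lemma pvCoords_nonneg_snd (lines : List String) :
    ∀ p ∈ pvCoords lines, 0 ≤ (fun (p : Int × Int) => p.2) p := by
  intro p hp
  obtain ⟨k, _, m, _, _, rfl⟩ := (pvMem_coords lines p).1 hp
  simp

-- the row flags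
lemma pvRows_eq (lines : List String) :
    pvMark (pvCoords lines) (·.1) (List.replicate lines.length false)
    = lines.map (fun line => PySem.Str.isIn "#" line) := by
  apply List.ext_getElem
  · rw [pvMark_length]; simp
  · intro t ht1 ht2
    have htl : t < lines.length := by rw [pvMark_length] at ht1; simpa using ht1
    rw [pvMark_getElem _ _ _ (pvCoords_nonneg_fst lines) t (by simpa using htl) ht1]
    simp only [List.getElem_replicate, Bool.false_or, List.getElem_map]
    rw [Bool.eq_iff_iff, List.any_eq_true]
    have : PySem.Str.isIn "#" lines[t] = PySem.Chars.isIn "#".toList (lines[t]).toList := by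
      simp [PySem.Str.isIn]
    rw [this, PySem.Chars.isIn_iff_infix]
    have hstr : ("#" : String).toList = ['#'] := rfl
    rw [hstr, List.singleton_infix_iff, List.mem_iff_getElem]
    constructor
    · rintro ⟨p, hp, hpt⟩
      obtain ⟨k, hk, m, hm, hc, rfl⟩ := (pvMem_coords lines p).1 hp
      simp only [decide_eq_true_eq] at hpt
      have : k = t := by exact_mod_cast hpt
      subst this
      exact ⟨m, hm, hc⟩
    · rintro ⟨m, hm, hc⟩
      exact ⟨((t : Int), (m : Int)),
        (pvMem_coords lines _).2 ⟨t, htl, m, hm, hc, rfl⟩, by simp⟩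

-- a length-1 slice reads one character
lemma pvSlice_one (cs : List Char) (t : Nat) :
    PySem.List.slice cs (some ((t : Int))) (some ((t : Int) + 1)) = (cs[t]?).toList := by
  have : ((t : Int) + 1) = (((t + 1 : Nat)) : Int) := by push_cast; ring
  rw [this, PySem.List.slice_natCast]
  have : t + 1 - t = 1 := by omega
  rw [this, List.take_one, List.head?_drop]

-- the column flags
lemma pvCols_eq (lines : List String) :
    pvMark (pvCoords lines) (·.2) (List.replicate (lines.headD "").toList.length false)
    = (PySem.List.pyRange 0 ((lines.headD "").toList.length : Int) 1).map
        (fun j => lines.any (fun line => PySem.Str.slice line (some j) (some (j + 1)) == "#")) := by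
  apply List.ext_getElem
  · rw [pvMark_length]; simp [PySem.List.length_pyRange_one]
  · intro t ht1 ht2
    have htw : t < (lines.headD "").toList.length := by
      rw [pvMark_length] at ht1; simpa using ht1
    rw [pvMark_getElem _ _ _ (pvCoords_nonneg_snd lines) t (by simpa using htw) ht1]
    simp only [List.getElem_replicate, Bool.false_or, List.getElem_map,
      PySem.List.getElem_pyRange_one, zero_add]
    rw [Bool.eq_iff_iff, List.any_eq_true, List.any_eq_true]
    have hsl : ∀ line : String,
        (PySem.Str.slice line (some ((t : Int))) (some ((t : Int) + 1)) == "#")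
        = decide (line.toList[t]? = some '#') := by
      intro line
      have h1 : (PySem.Str.slice line (some ((t : Int))) (some ((t : Int) + 1))).toList
          = (line.toList[t]?).toList := by
        simp [PySem.Str.slice, pvSlice_one]
      rw [Bool.eq_iff_iff, beq_iff_eq, String.ext_iff, h1, decide_eq_true_eq]
      have hstr : ("#" : String).toList = ['#'] := rfl
      rw [hstr]
      cases line.toList[t]? <;> simp
    constructor
    · rintro ⟨p, hp, hpt⟩
      obtain ⟨k, hk, m, hm, hc, rfl⟩ := (pvMem_coords lines p).1 hp
      simp only [decide_eq_true_eq] at hpt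
      have hmt : m = t := by exact_mod_cast hpt
      subst hmt
      exact ⟨lines[k], List.getElem_mem hk, by
        rw [hsl]; simp [List.getElem?_eq_getElem hm, hc]⟩
    · rintro ⟨line, hline, hc⟩
      rw [hsl, decide_eq_true_eq] at hc
      obtain ⟨k, hk, rfl⟩ := List.mem_iff_getElem.1 hline
      obtain ⟨hm, hcc⟩ := List.getElem?_eq_some_iff.1 hc
      exact ⟨((k : Int), (t : Int)),
        (pvMem_coords lines _).2 ⟨k, hk, t, hm, hcc, rfl⟩, by simp⟩

-- ===== VERDICT (by name: the statement is the Claim_ definition above) =====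
theorem scan_galaxies_spec : Claim_equal_scan_galaxies := by
  intro lines _ _
  simp only [Spec_scan_galaxies, scan_galaxies, scan_galaxies_alt]
  rw [pvOuter, pvBOuter]
  simp only [List.nil_append, List.length_nil, Nat.cast_zero]
  refine Prod.ext rfl (Prod.ext ?_ ?_)
  · exact pvRows_eq lines
  · exact pvCols_eq lines
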